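-- pv_equiv track=rewrite | github.com/PolinaDmitr/ege-2026 | ege23/1/15.py | f
-- ===== SOURCE A (Python) =====
-- def f(a, b, command: str):
--     if a == b:
--         l1 = '1111111' in command and '11111111' not in command
--         l2 = '2222222' in command and '22222222' not in command
--         return int(l1 and l2)
--     if a > b:
--         return 0
--     s = sum(int(x) for x in str(a))
--     return f(a + 2, b, command + '1') + f(a + s, b, command + '2')
-- ===== SOURCE B (Python) =====
-- def _push(st, ch):
--     t1, t2, h71, h81, h72, h82 = st
--     if ch == '1':
--         t1 = min(t1 + 1, 8)
--         t2 = 0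
--         h71 = h71 or t1 >= 7
--         h81 = h81 or t1 >= 8
--     elif ch == '2':
--         t2 = min(t2 + 1, 8)
--         t1 = 0
--         h72 = h72 or t2 >= 7
--         h82 = h82 or t2 >= 8
--     else:
--         t1 = 0
--         t2 = 0
--     return (t1, t2, h71, h81, h72, h82)
--
--
-- def _digit_sum(x):
--     s = 0
--     while x > 0:
--         s += x % 10
--         x //= 10
--     return s
--
--
-- def _states():
--     # at most one of the two trailing-run counters can be nonzero
--     pairs = [(0, 0)]
--     for i in range(1, 9):
--         pairs.append((i, 0))
--     for i in range(1, 9):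
--         pairs.append((0, i))
--     out = []
--     for (t1, t2) in pairs:
--         for h71 in (False, True):
--             for h81 in (False, True):
--                 for h72 in (False, True):
--                     for h82 in (False, True):
--                         out.append((t1, t2, h71, h81, h72, h82))
--     return out
--
--
-- def _get(T, b, y, st):
--     if y > b:
--         return 0
--     return T.get((y, st), 0)
--
--
-- def f(a, b, command: str):
--     st0 = (0, 0, False, False, False, False)
--     for ch in command:
--         st0 = _push(st0, ch)
--     if a > b:
--         return 0
--     states = _states()
--     T = {}
--     for st in states:
--         t1, t2, h71, h81, h72, h82 = st
--         T[(b, st)] = 1 if (h71 and not h81 and h72 and not h82) else 0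
--     x = b - 1
--     while x >= a:
--         s = _digit_sum(x)
--         for st in states:
--             v = _get(T, b, x + 2, _push(st, '1')) + _get(T, b, x + s, _push(st, '2'))
--             T[(x, st)] = v
--         x -= 1
--     return T[(a, st0)]
-- ===== Notes on version B (the rewrite author's own statement) =====
-- stated objective: alternative
-- what changed: A counts paths by recursion that grows the command string and rescans it for 7/8-runs at every leaf; B runs a single pass over command to get a run-automaton state (capped run lengths + seen-7/8-run flags) and then fills a bottom-up DP table over (position, state) from b down to a, so each position is processed once.
import Mathlib
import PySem

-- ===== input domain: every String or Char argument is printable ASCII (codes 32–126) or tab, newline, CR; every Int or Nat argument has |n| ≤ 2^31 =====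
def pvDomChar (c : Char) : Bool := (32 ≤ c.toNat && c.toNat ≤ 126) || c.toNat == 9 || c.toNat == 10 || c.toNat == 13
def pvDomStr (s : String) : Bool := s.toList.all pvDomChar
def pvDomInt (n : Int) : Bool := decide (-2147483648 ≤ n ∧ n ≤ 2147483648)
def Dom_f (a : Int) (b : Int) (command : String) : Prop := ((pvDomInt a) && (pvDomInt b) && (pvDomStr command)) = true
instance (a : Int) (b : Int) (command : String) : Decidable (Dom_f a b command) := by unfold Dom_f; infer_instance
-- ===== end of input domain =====

-- B replaces A's exponential recursion over growing command strings by a bottom-up DP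
-- over (position, run-automaton state); equal return values on Pre_f (proved below).

-- ===== PORT A =====
-- sum(int(x) for x in str(a))  — int(single char) via PySem.Int.ofChars?
def digsumA (a : Int) : Int :=
  ((PySem.Int.toChars a).map (fun c => (PySem.Int.ofChars? [c]).getD 0)).sum

-- Nat-level digit sum, used only to justify termination of the port of A
-- (Python's recursion makes progress because the digit sum of a positive int is positive).
def dsumN (n : Nat) : Nat :=
  if n = 0 then 0 else n % 10 + dsumN (n / 10)
decreasing_by exact Nat.div_lt_self (by omega) (by omega)

lemma vInt_digitChar (k : Nat) (h : k < 10) :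
    (PySem.Int.ofChars? [Nat.digitChar k]).getD 0 = (k : Int) := by
  interval_cases k <;> decide

lemma toDigitsCore_sum (f : Nat) : ∀ (n : Nat) (acc : List Char), n ≤ f →
    ((Nat.toDigitsCore 10 (f + 1) n acc).map (fun c => (PySem.Int.ofChars? [c]).getD 0)).sum
      = (dsumN n : Int) + ((acc.map (fun c => (PySem.Int.ofChars? [c]).getD 0)).sum) := by
  induction f with
  | zero =>
    intro n acc hn
    have hn0 : n = 0 := by omega
    subst hn0
    rw [Nat.toDigitsCore]
    norm_num
    rw [dsumN]
    simp [vInt_digitChar 0 (by omega)]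
  | succ f ih =>
    intro n acc hn
    rw [Nat.toDigitsCore]
    by_cases h0 : n / 10 = 0
    · rw [if_pos h0]
      rw [dsumN]
      by_cases hz : n = 0
      · subst hz
        simp [vInt_digitChar 0 (by omega)]
      · rw [if_neg hz]
        rw [h0, dsumN, if_pos rfl]
        simp [vInt_digitChar (n % 10) (Nat.mod_lt _ (by omega))]
    · rw [if_neg h0]
      have hle : n / 10 ≤ f := by
        have := Nat.div_lt_self (by omega : 0 < n) (by omega : 1 < 10)
        omega
      rw [ih (n / 10) _ hle]
      conv_rhs => rw [dsumN, if_neg (by omega : ¬ n = 0)]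
      simp [vInt_digitChar (n % 10) (Nat.mod_lt _ (by omega))]
      ring

lemma dsumN_pos (n : Nat) (h : 1 ≤ n) : 1 ≤ dsumN n := by
  induction n using Nat.strong_induction_on with
  | _ n ih =>
    rw [dsumN]
    rw [if_neg (by omega : ¬ n = 0)]
    by_cases hlt : n < 10
    · have h10 : n / 10 = 0 := by omega
      have h11 : n % 10 = n := by omega
      omega
    · have h1 : 1 ≤ n / 10 := by omega
      have h2 : n / 10 < n := Nat.div_lt_self (by omega) (by omega)
      have := ih (n / 10) h2 h1
      omega

lemma digsumA_eq (x : Int) (hx : 1 ≤ x) : digsumA x = (dsumN x.toNat : Int) := by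
  unfold digsumA PySem.Int.toChars
  rw [if_neg (by omega : ¬ x < 0)]
  unfold Nat.toDigits
  rw [toDigitsCore_sum x.toNat x.toNat [] le_rfl]
  simp

lemma digsumA_pos (x : Int) (hx : 1 ≤ x) : 1 ≤ digsumA x := by
  rw [digsumA_eq x hx]
  exact_mod_cast dsumN_pos x.toNat (by omega)

-- the recursion of A, over the command as a list of characters
def fRec (a : Int) (b : Int) (l : List Char) : Int :=
  if a = b then
    if (PySem.Chars.isIn "1111111".toList l && !(PySem.Chars.isIn "11111111".toList l))
        && (PySem.Chars.isIn "2222222".toList l && !(PySem.Chars.isIn "22222222".toList l))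
    then 1 else 0
  else if b < a then 0
  else if a ≤ 0 then 0
    -- guard: Python raises here (ValueError on '-' / RecursionError at a = 0); outside Pre_f
  else fRec (a + 2) b (l ++ ['1']) + fRec (a + digsumA a) b (l ++ ['2'])
termination_by (b - a).toNat
decreasing_by
  · omega
  · have := digsumA_pos a (by omega)
    omega

def f (a : Int) (b : Int) (command : String) : Int := fRec a b command.toList

-- ===== PORT B =====
-- state of the run automaton: (t1, t2, h71, h81, h72, h82)
abbrev BSt : Type := Int × Int × Bool × Bool × Bool × Bool

def bPush (st : BSt) (ch : Char) : BSt :=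
  if ch = '1' then
    let t1' := min (st.1 + 1) 8
    (t1', 0, st.2.2.1 || decide (7 ≤ t1'), st.2.2.2.1 || decide (8 ≤ t1'), st.2.2.2.2.1, st.2.2.2.2.2)
  else if ch = '2' then
    let t2' := min (st.2.1 + 1) 8
    (0, t2', st.2.2.1, st.2.2.2.1, st.2.2.2.2.1 || decide (7 ≤ t2'), st.2.2.2.2.2 || decide (8 ≤ t2'))
  else
    (0, 0, st.2.2.1, st.2.2.2.1, st.2.2.2.2.1, st.2.2.2.2.2)

def bDigitSum (x : Int) : Int :=
  if 0 < x then PySem.Int.mod x 10 + bDigitSum (PySem.Int.floordiv x 10) else 0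
termination_by x.toNat
decreasing_by
  rw [PySem.Int.floordiv_eq_ediv_of_pos (by omega : (0:Int) < 10)]
  omega

-- at most one of the two trailing-run counters can be nonzero
def bPairs : List (Int × Int) :=
  [(0, 0)] ++ (PySem.List.pyRange 1 9 1).map (fun i => (i, 0))
    ++ (PySem.List.pyRange 1 9 1).map (fun i => (0, i))

def bStates : List BSt :=
  bPairs.flatMap (fun p =>
    [false, true].flatMap (fun h71 =>
      [false, true].flatMap (fun h81 =>
        [false, true].flatMap (fun h72 =>
          [false, true].map (fun h82 => ((p.1, p.2, h71, h81, h72, h82) : BSt))))))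

abbrev BTab := PySem.Dict (Int × BSt) Int

def bGet (T : BTab) (b : Int) (y : Int) (st : BSt) : Int :=
  if b < y then 0 else T.getD (y, st) 0

def bAccept (st : BSt) : Int :=
  if st.2.2.1 && !st.2.2.2.1 && st.2.2.2.2.1 && !st.2.2.2.2.2 then 1 else 0

def bBase (b : Int) : BTab :=
  bStates.foldl (fun T st => T.insert (b, st) (bAccept st)) PySem.Dict.empty

def bRow (b : Int) (x : Int) (T : BTab) : BTab :=
  let s := bDigitSum x
  bStates.foldl
    (fun T st => T.insert (x, st)
      (bGet T b (x + 2) (bPush st '1') + bGet T b (x + s) (bPush st '2'))) T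

def bLoop (a : Int) (b : Int) (x : Int) (T : BTab) : BTab :=
  if a ≤ x then bLoop a b (x - 1) (bRow b x T) else T
termination_by (x - a + 1).toNat
decreasing_by omega

def f_alt (a : Int) (b : Int) (command : String) : Int :=
  let st0 := command.toList.foldl bPush ((0, 0, false, false, false, false) : BSt)
  if b < a then 0
  else (bLoop a b (b - 1) (bBase b)).getD (a, st0) 0

-- ===== PRECONDITION & SPEC =====
-- Pre_f excludes exactly the inputs with a ≤ 0 and a < b, on which A raises
-- (ValueError: int('-') for a < 0, RecursionError for a = 0) instead of returning.
def Pre_f (a : Int) (b : Int) (command : String) : Prop := 1 ≤ a ∨ b ≤ a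
instance (a : Int) (b : Int) (command : String) : Decidable (Pre_f a b command) := by unfold Pre_f; infer_instance
def pvWitness_f : Int × Int × String := (1, 1, "")

def Spec_f (a : Int) (b : Int) (command : String) (out : Int) : Prop := out = f_alt a b command
instance (a : Int) (b : Int) (command : String) (out : Int) : Decidable (Spec_f a b command out) := by unfold Spec_f; infer_instance

-- ===== CLAIM (what is proved, stated in full; the proofs are below) =====
def Claim_equal_f : Prop := ∀ (a : Int) (b : Int) (command : String), Dom_f a b command → Pre_f a b command → Spec_f a b command (f a b command)

-- ===== LEMMAS AND PROOFS =====

-- run-length of the trailing block of c's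
def trailLen (c : Char) (l : List Char) : Nat := (l.reverse.takeWhile (fun x => x == c)).length

lemma trailLen_append (c a : Char) (l : List Char) :
    trailLen c (l ++ [a]) = if a = c then trailLen c l + 1 else 0 := by
  unfold trailLen
  rw [List.reverse_append]
  by_cases h : a = c <;> simp [h]

lemma prefix_replicate_iff (c : Char) : ∀ (r : List Char) (k : Nat),
    List.replicate k c <+: r ↔ k ≤ (r.takeWhile (fun x => x == c)).length := by
  intro r
  induction r with
  | nil =>
    intro k
    cases k <;> simp [List.replicate]
  | cons x r ih =>
    intro k
    cases k with
    | zero => simp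
    | succ k =>
      rw [List.replicate_succ, List.cons_prefix_cons]
      by_cases h : x = c
      · subst h
        simp [List.takeWhile, ih k]
      · have hb : (x == c) = false := by simp [h]
        simp [List.takeWhile, hb, Ne.symm h]

lemma suffix_replicate_iff (c : Char) (k : Nat) (l : List Char) :
    List.replicate k c <:+ l ↔ k ≤ trailLen c l := by
  rw [← List.reverse_prefix, List.reverse_replicate]
  exact prefix_replicate_iff c l.reverse k

lemma infix_append_singleton (p l : List Char) (a : Char) :
    p <:+: l ++ [a] ↔ p <:+: l ∨ p <:+ l ++ [a] := by
  constructor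
  · rintro ⟨s, t, h⟩
    rcases List.eq_nil_or_concat t with rfl | ⟨t', a', rfl⟩
    · right
      exact ⟨s, by simpa using h⟩
    · left
      have h' : (s ++ p ++ t') ++ [a'] = l ++ [a] := by simpa using h
      have h2 : ((s ++ p ++ t') ++ [a']).dropLast = (l ++ [a]).dropLast := by rw [h']
      rw [List.dropLast_concat, List.dropLast_concat] at h2
      exact ⟨s, t', h2⟩
  · rintro (⟨s, t, rfl⟩ | ⟨s, hs⟩)
    · exact ⟨s, t ++ [a], by simp⟩
    · exact ⟨s, [], by simp [hs]⟩

lemma replicate_infix_append (k : Nat) (c a : Char) (l : List Char) :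
    (List.replicate k c <:+: l ++ [a]) ↔
      (List.replicate k c <:+: l ∨ (a = c ∧ k ≤ trailLen c l + 1)) := by
  rw [infix_append_singleton]
  constructor
  · rintro (h | h)
    · exact Or.inl h
    · rw [suffix_replicate_iff, trailLen_append] at h
      by_cases ha : a = c
      · rw [if_pos ha] at h; exact Or.inr ⟨ha, h⟩
      · rw [if_neg ha] at h
        left
        have hk : k = 0 := by omega
        subst hk
        exact List.nil_infix
  · rintro (h | ⟨ha, hk'⟩)
    · exact Or.inl h
    · right
      rw [suffix_replicate_iff, trailLen_append, if_pos ha]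
      omega

-- the automaton state that B computes for a command string
def stOf (l : List Char) : BSt := l.foldl bPush ((0, 0, false, false, false, false) : BSt)

def goodSt (l : List Char) (st : BSt) : Prop :=
  st.1 = ((min (trailLen '1' l) 8 : Nat) : Int) ∧
  st.2.1 = ((min (trailLen '2' l) 8 : Nat) : Int) ∧
  st.2.2.1 = decide (List.replicate 7 '1' <:+: l) ∧
  st.2.2.2.1 = decide (List.replicate 8 '1' <:+: l) ∧
  st.2.2.2.2.1 = decide (List.replicate 7 '2' <:+: l) ∧
  st.2.2.2.2.2 = decide (List.replicate 8 '2' <:+: l)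

lemma stOf_append (l : List Char) (a : Char) : stOf (l ++ [a]) = bPush (stOf l) a := by
  unfold stOf
  rw [List.foldl_append]
  rfl

lemma decide_or_merge (A C B : Prop) [Decidable A] [Decidable C] [Decidable B] (h : C ↔ B) :
    (decide A || decide C) = decide (A ∨ B) := by
  by_cases hA : A <;> by_cases hB : B <;> simp [hA, hB, h]

lemma stOf_good : ∀ l, goodSt l (stOf l) := by
  intro l
  induction l using List.reverseRecOn with
  | nil =>
    exact ⟨by simp [stOf, trailLen], by simp [stOf, trailLen], by decide, by decide, by decide, by decide⟩
  | append_singleton l a ih =>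
    obtain ⟨h1, h2, h3, h4, h5, h6⟩ := ih
    rw [stOf_append]
    unfold bPush goodSt
    by_cases ha1 : a = '1'
    · subst ha1
      rw [if_pos rfl]
      refine ⟨?_, ?_, ?_, ?_, ?_, ?_⟩
      · dsimp only
        rw [h1, trailLen_append, if_pos rfl]
        push_cast
        omega
      · dsimp only
        rw [trailLen_append, if_neg (by decide : ¬ ('1':Char) = '2')]
        simp
      · dsimp only
        rw [h3, h1]
        simp only [replicate_infix_append, true_and]
        exact decide_or_merge _ _ _ (by push_cast; omega)
      · dsimp only
        rw [h4, h1]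
        simp only [replicate_infix_append, true_and]
        exact decide_or_merge _ _ _ (by push_cast; omega)
      · dsimp only
        rw [h5]
        simp only [replicate_infix_append, show ¬ ('1':Char) = '2' by decide, false_and, or_false]
      · dsimp only
        rw [h6]
        simp only [replicate_infix_append, show ¬ ('1':Char) = '2' by decide, false_and, or_false]
    · by_cases ha2 : a = '2'
      · subst ha2
        rw [if_neg (by decide : ¬ ('2':Char) = '1'), if_pos rfl]
        refine ⟨?_, ?_, ?_, ?_, ?_, ?_⟩
        · dsimp only
          rw [trailLen_append, if_neg (by decide : ¬ ('2':Char) = '1')]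
          simp
        · dsimp only
          rw [h2, trailLen_append, if_pos rfl]
          push_cast
          omega
        · dsimp only
          rw [h3]
          simp only [replicate_infix_append, show ¬ ('2':Char) = '1' by decide, false_and, or_false]
        · dsimp only
          rw [h4]
          simp only [replicate_infix_append, show ¬ ('2':Char) = '1' by decide, false_and, or_false]
        · dsimp only
          rw [h5, h2]
          simp only [replicate_infix_append, true_and]
          exact decide_or_merge _ _ _ (by push_cast; omega)
        · dsimp only
          rw [h6, h2]
          simp only [replicate_infix_append, true_and]
          exact decide_or_merge _ _ _ (by push_cast; omega)
      · rw [if_neg ha1, if_neg ha2]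
        refine ⟨?_, ?_, ?_, ?_, ?_, ?_⟩
        · dsimp only
          rw [trailLen_append, if_neg ha1]
          simp
        · dsimp only
          rw [trailLen_append, if_neg ha2]
          simp
        · dsimp only
          rw [h3]
          simp only [replicate_infix_append, ha1, false_and, or_false]
        · dsimp only
          rw [h4]
          simp only [replicate_infix_append, ha1, false_and, or_false]
        · dsimp only
          rw [h5]
          simp only [replicate_infix_append, ha2, false_and, or_false]
        · dsimp only
          rw [h6]
          simp only [replicate_infix_append, ha2, false_and, or_false]

lemma mem_bPairs (p : Int × Int) :
    p ∈ bPairs ↔ (0 ≤ p.1 ∧ p.1 ≤ 8 ∧ 0 ≤ p.2 ∧ p.2 ≤ 8 ∧ (p.1 = 0 ∨ p.2 = 0)) := by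
  obtain ⟨t1, t2⟩ := p
  simp only [bPairs, List.mem_append, List.mem_singleton, List.mem_map,
    PySem.List.mem_pyRange_one, Prod.mk.injEq]
  constructor
  · rintro ((⟨rfl, rfl⟩ | ⟨i, ⟨hi1, hi2⟩, rfl, rfl⟩) | ⟨i, ⟨hi1, hi2⟩, rfl, rfl⟩) <;> omega
  · rintro ⟨ht1, ht1', ht2, ht2', hz | hz⟩
    · subst hz
      by_cases h2z : t2 = 0
      · subst h2z
        exact Or.inl (Or.inl ⟨rfl, rfl⟩)
      · exact Or.inr ⟨t2, ⟨by omega, by omega⟩, rfl, rfl⟩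
    · subst hz
      by_cases h1z : t1 = 0
      · subst h1z
        exact Or.inl (Or.inl ⟨rfl, rfl⟩)
      · exact Or.inl (Or.inr ⟨t1, ⟨by omega, by omega⟩, rfl, rfl⟩)

lemma mem_bStates (st : BSt) :
    st ∈ bStates ↔ (0 ≤ st.1 ∧ st.1 ≤ 8 ∧ 0 ≤ st.2.1 ∧ st.2.1 ≤ 8 ∧ (st.1 = 0 ∨ st.2.1 = 0)) := by
  obtain ⟨t1, t2, h71, h81, h72, h82⟩ := st
  simp only [bStates, List.mem_flatMap, List.mem_map]
  constructor
  · rintro ⟨p, hp, b1, -, b2, -, b3, -, b4, -, heq⟩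
    simp only [Prod.mk.injEq] at heq
    obtain ⟨h1, h2, rfl, rfl, rfl, rfl⟩ := heq
    rw [mem_bPairs] at hp
    omega
  · rintro ⟨ht1, ht1', ht2, ht2', hz⟩
    exact ⟨(t1, t2), (mem_bPairs (t1, t2)).mpr ⟨ht1, ht1', ht2, ht2', hz⟩,
      h71, by cases h71 <;> simp, h81, by cases h81 <;> simp, h72, by cases h72 <;> simp,
      h82, by cases h82 <;> simp, rfl⟩

lemma trailLen_disj (l : List Char) : trailLen '1' l = 0 ∨ trailLen '2' l = 0 := by
  induction l using List.reverseRecOn with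
  | nil => exact Or.inl rfl
  | append_singleton l a ih =>
    rw [trailLen_append, trailLen_append]
    by_cases h1 : a = '1'
    · subst h1
      exact Or.inr (by rw [if_neg (by decide : ¬ ('1':Char) = '2')])
    · by_cases h2 : a = '2'
      · subst h2
        exact Or.inl (by rw [if_neg (by decide : ¬ ('2':Char) = '1')])
      · exact Or.inl (by rw [if_neg h1])

lemma goodSt_mem (l : List Char) (st : BSt) (h : goodSt l st) : st ∈ bStates := by
  obtain ⟨h1, h2, -, -, -, -⟩ := h
  rw [mem_bStates, h1, h2]
  have := trailLen_disj l
  push_cast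
  omega

lemma bPush_mem (st : BSt) (c : Char) (h : st ∈ bStates) : bPush st c ∈ bStates := by
  rw [mem_bStates] at h ⊢
  unfold bPush
  by_cases h1 : c = '1'
  · rw [if_pos h1]
    dsimp only
    omega
  · by_cases h2 : c = '2'
    · rw [if_neg h1, if_pos h2]
      dsimp only
      omega
    · rw [if_neg h1, if_neg h2]
      dsimp only
      omega

lemma bDigitSum_eq (x : Int) : 0 ≤ x → bDigitSum x = (dsumN x.toNat : Int) := by
  fun_induction bDigitSum x with
  | case1 x h ih =>
    intro hx
    rw [PySem.Int.mod_eq_emod_of_pos (by omega : (0:Int) < 10)]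
    rw [PySem.Int.floordiv_eq_ediv_of_pos (by omega : (0:Int) < 10)] at *
    rw [ih (by omega)]
    conv_rhs => rw [dsumN]
    rw [if_neg (by omega : ¬ x.toNat = 0)]
    have h1 : (x / 10).toNat = x.toNat / 10 := by omega
    have h2 : x % 10 = (x.toNat % 10 : Nat) := by omega
    rw [h1, h2]
    push_cast
    ring
  | case2 x h =>
    intro hx
    have hx0 : x = 0 := by omega
    subst hx0
    simp [dsumN]

lemma bDigitSum_pos (x : Int) (hx : 1 ≤ x) : 1 ≤ bDigitSum x := by
  rw [bDigitSum_eq x (by omega)]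
  exact_mod_cast dsumN_pos x.toNat (by omega)

-- the value semantics of the DP: exactly A's recursion on the compressed state
def gVal (b : Int) (y : Int) (st : BSt) : Int :=
  if b < y then 0
  else if y = b then bAccept st
  else if y ≤ 0 then 0
  else gVal b (y + 2) (bPush st '1') + gVal b (y + bDigitSum y) (bPush st '2')
termination_by (b - y).toNat
decreasing_by
  · omega
  · have := bDigitSum_pos y (by omega)
    omega

lemma leaf_eq (l : List Char) :
    (if (PySem.Chars.isIn "1111111".toList l && !(PySem.Chars.isIn "11111111".toList l))
        && (PySem.Chars.isIn "2222222".toList l && !(PySem.Chars.isIn "22222222".toList l))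
     then (1 : Int) else 0) = bAccept (stOf l) := by
  obtain ⟨-, -, h3, h4, h5, h6⟩ := stOf_good l
  have hIn : ∀ (sub : List Char), PySem.Chars.isIn sub l = decide (sub <:+: l) := by
    intro sub
    cases hsub : PySem.Chars.isIn sub l with
    | true => exact (decide_eq_true ((PySem.Chars.isIn_iff_infix _ _).mp hsub)).symm
    | false => exact (decide_eq_false ((PySem.Chars.isIn_eq_false_iff _ _).mp hsub)).symm
  unfold bAccept
  rw [h3, h4, h5, h6, hIn, hIn, hIn, hIn]
  rw [show ("1111111".toList : List Char) = List.replicate 7 '1' by decide]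
  rw [show ("11111111".toList : List Char) = List.replicate 8 '1' by decide]
  rw [show ("2222222".toList : List Char) = List.replicate 7 '2' by decide]
  rw [show ("22222222".toList : List Char) = List.replicate 8 '2' by decide]
  simp only [← Bool.and_assoc]

-- A's recursion equals the state recursion
lemma fRec_eq_gVal (a : Int) (b : Int) (l : List Char) :
    1 ≤ a → fRec a b l = gVal b a (stOf l) := by
  fun_induction fRec a b l with
  | case1 l hcond =>
    intro ha
    rw [gVal, if_neg (lt_irrefl b), if_pos rfl]
    rw [← leaf_eq l, if_pos hcond]
  | case2 l hcond =>
    intro ha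
    rw [gVal, if_neg (lt_irrefl b), if_pos rfl]
    rw [← leaf_eq l, if_neg hcond]
  | case3 a l hab hba =>
    intro ha
    rw [gVal, if_pos hba]
  | case4 a l hab hba ha0 =>
    intro ha
    exact absurd ha (by omega)
  | case5 a l hab hba ha0 ih1 ih2 =>
    intro ha
    have hdpos := digsumA_pos a ha
    have hd : digsumA a = bDigitSum a := by
      rw [digsumA_eq a ha, bDigitSum_eq a (by omega)]
    rw [gVal, if_neg (by omega : ¬ b < a), if_neg hab, if_neg ha0]
    rw [ih1 (by omega), ih2 (by omega)]
    rw [stOf_append, stOf_append, hd]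

-- generic lookup lemma for one row-building fold
lemma foldl_insert_get? (x : Int) (F : BTab → BSt → Int)
    (hF : ∀ (T T' : BTab) (st : BSt),
      (∀ (y : Int) (st' : BSt), y ≠ x → T.get? (y, st') = T'.get? (y, st')) → F T st = F T' st) :
    ∀ (ss : List BSt) (T : BTab),
      (∀ (y : Int) (st' : BSt), y ≠ x →
          (ss.foldl (fun d st => d.insert (x, st) (F d st)) T).get? (y, st') = T.get? (y, st'))
      ∧ (∀ st' ∈ ss,
          (ss.foldl (fun d st => d.insert (x, st) (F d st)) T).get? (x, st') = some (F T st'))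
      ∧ (∀ (st' : BSt), st' ∉ ss →
          (ss.foldl (fun d st => d.insert (x, st) (F d st)) T).get? (x, st') = T.get? (x, st')) := by
  intro ss
  induction ss with
  | nil =>
    intro T
    exact ⟨fun _ _ _ => rfl, fun _ h => absurd h List.not_mem_nil, fun _ _ => rfl⟩
  | cons st ss ih =>
    intro T
    simp only [List.foldl_cons]
    have hoff : ∀ (y : Int) (st' : BSt), y ≠ x →
        (T.insert (x, st) (F T st)).get? (y, st') = T.get? (y, st') := by
      intro y st' hy
      exact PySem.Dict.get?_insert_of_ne _ _ (fun h => hy (congrArg Prod.fst h))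
    obtain ⟨ihA, ihB, ihC⟩ := ih (T.insert (x, st) (F T st))
    refine ⟨?_, ?_, ?_⟩
    · intro y st' hy
      rw [ihA y st' hy, hoff y st' hy]
    · intro st' hmem
      rcases List.mem_cons.mp hmem with heq | hmem'
      · subst heq
        by_cases hin : st' ∈ ss
        · rw [ihB st' hin]
          congr 1
          exact hF _ _ _ hoff
        · rw [ihC st' hin]
          exact PySem.Dict.get?_insert_self _ _ _
      · rw [ihB st' hmem']
        congr 1
        exact hF _ _ _ hoff
    · intro st' hmem
      have h1 : st' ≠ st := by
        intro h
        exact hmem (h ▸ List.mem_cons_self)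
      have h2 : st' ∉ ss := fun h => hmem (List.mem_cons_of_mem _ h)
      rw [ihC st' h2]
      exact PySem.Dict.get?_insert_of_ne _ _ (fun h => h1 (congrArg Prod.snd h))

def TInv (b : Int) (T : BTab) (lo : Int) : Prop :=
  ∀ (y : Int) (st : BSt), lo ≤ y → y ≤ b → st ∈ bStates → T.get? (y, st) = some (gVal b y st)

lemma bBase_inv (b : Int) : TInv b (bBase b) b := by
  intro y st hy hyb hmem
  have hyb' : y = b := le_antisymm hyb hy
  subst hyb'
  unfold bBase
  rw [(foldl_insert_get? y (fun _ st => bAccept st) (fun _ _ _ _ => rfl) bStates PySem.Dict.empty).2.1 st hmem]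
  rw [gVal, if_neg (lt_irrefl y), if_pos rfl]

lemma bRow_inv (b x : Int) (T : BTab) (hx : 1 ≤ x) (hxb : x < b) (h : TInv b T (x + 1)) :
    TInv b (bRow b x T) x := by
  have hs := bDigitSum_pos x hx
  have hF : ∀ (T1 T2 : BTab) (st : BSt),
      (∀ (y : Int) (st' : BSt), y ≠ x → T1.get? (y, st') = T2.get? (y, st')) →
      bGet T1 b (x + 2) (bPush st '1') + bGet T1 b (x + bDigitSum x) (bPush st '2')
        = bGet T2 b (x + 2) (bPush st '1') + bGet T2 b (x + bDigitSum x) (bPush st '2') := by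
    intro T1 T2 st hagree
    unfold bGet
    rw [PySem.Dict.getD_eq_get?_getD, PySem.Dict.getD_eq_get?_getD,
        PySem.Dict.getD_eq_get?_getD, PySem.Dict.getD_eq_get?_getD]
    rw [hagree (x + 2) _ (by omega), hagree (x + bDigitSum x) _ (by omega)]
  have hfold := foldl_insert_get? x _ hF bStates T
  intro y st hy hyb hmem
  simp only [bRow]
  rcases eq_or_lt_of_le hy with heq | hlt
  · subst heq
    rw [hfold.2.1 st hmem]
    have hval : ∀ (y' : Int) (c : Char), x + 1 ≤ y' →
        bGet T b y' (bPush st c) = gVal b y' (bPush st c) := by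
      intro y' c hy'
      unfold bGet
      by_cases hb : b < y'
      · rw [if_pos hb, gVal, if_pos hb]
      · rw [if_neg hb]
        exact PySem.Dict.getD_of_get?_eq_some _ _ (h y' _ hy' (by omega) (bPush_mem st c hmem))
    rw [hval (x + 2) '1' (by omega), hval (x + bDigitSum x) '2' (by omega)]
    conv_rhs => rw [gVal, if_neg (show ¬ b < x by omega), if_neg (show ¬ x = b by omega),
      if_neg (show ¬ x ≤ 0 by omega)]
  · rw [hfold.1 y st (by omega)]
    exact h y st (by omega) hyb hmem

lemma bLoop_inv (a b : Int) (ha : 1 ≤ a) : ∀ (x : Int) (T : BTab), x < b → TInv b T (x + 1) →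
    TInv b (bLoop a b x T) (min a (x + 1)) := by
  intro x T
  fun_induction bLoop a b x T with
  | case1 x T hax ih =>
    intro hxb hinv
    have hrow := bRow_inv b x T (by omega) hxb hinv
    have hrec := ih (by omega) (by rw [show x - 1 + 1 = x from by ring]; exact hrow)
    rw [show min a (x - 1 + 1) = min a (x + 1) from by omega] at hrec
    exact hrec
  | case2 x T hax =>
    intro hxb hinv
    rw [show min a (x + 1) = x + 1 from by omega]
    exact hinv

-- ===== VERDICT (by name: the statement is the Claim_ definition above) =====
theorem f_spec : Claim_equal_f := by
  intro a b command hdom hpre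
  unfold Spec_f f f_alt
  by_cases hba : b < a
  · rw [if_pos hba]
    rw [fRec]
    rw [if_neg (by omega : ¬ a = b), if_pos hba]
  · rw [if_neg hba]
    have hst0 : command.toList.foldl bPush ((0, 0, false, false, false, false) : BSt) = stOf command.toList := rfl
    rw [hst0]
    by_cases hab : a = b
    · -- leaf: the loop body never runs, the base row holds bAccept
      subst hab
      have hloop : bLoop a a (a - 1) (bBase a) = bBase a := by
        rw [bLoop, if_neg (by omega : ¬ a ≤ a - 1)]
      rw [hloop]
      have hmem := goodSt_mem command.toList (stOf command.toList) (stOf_good command.toList)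
      have := bBase_inv a a (stOf command.toList) le_rfl le_rfl hmem
      rw [PySem.Dict.getD_of_get?_eq_some _ _ this]
      rw [fRec, if_pos rfl]
      rw [leaf_eq]
      rw [gVal, if_neg (by omega : ¬ a < a), if_pos rfl]
    · -- 1 ≤ a < b: A's recursion = state recursion = the DP table entry
      have ha1 : 1 ≤ a := by
        rcases hpre with h | h
        · exact h
        · omega
      have hab' : a < b := by omega
      have hinv := bLoop_inv a b ha1 (b - 1) (bBase b) (by omega)
        (by simpa [show b - 1 + 1 = b by ring] using bBase_inv b)
      have hmin : min a (b - 1 + 1) = a := by omega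
      rw [hmin] at hinv
      have hmem := goodSt_mem command.toList (stOf command.toList) (stOf_good command.toList)
      have := hinv a (stOf command.toList) le_rfl (by omega) hmem
      rw [PySem.Dict.getD_of_get?_eq_some _ _ this]
      exact fRec_eq_gVal a b command.toList ha1
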